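-- pv_equiv track=rewrite | github.com/kirill-kondrashov/lean-misc | tools/problem1_odd_profile_search.py | positive_boundary
-- ===== SOURCE A (Python) =====
-- from typing import Dict, Iterable, List, Sequence, Set, Tuple
--
-- Family = Tuple[int, ...]
--
-- def positive_boundary(family: Family, subsets: Sequence[int]) -> Set[int]:
--     family_set = set(family)
--     boundary: Set[int] = set()
--     for subset in subsets:
--         if subset in family_set:
--             continue
--         candidates = subset
--         while candidates:
--             bit = candidates & -candidates
--             if (subset ^ bit) in family_set:
--                 boundary.add(subset)
--                 break
--             candidates ^= bit
--     return boundary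
-- ===== SOURCE B (Python) =====
-- def positive_boundary(family, subsets):
--     family_set = set(family)
--     universe = 0
--     for s in subsets:
--         universe |= s
--     width = universe.bit_length()
--     successors = set()
--     for f in family:
--         for k in range(width):
--             successors.add(f | (1 << k))
--     boundary = set()
--     for s in subsets:
--         if s not in family_set and s in successors:
--             boundary.add(s)
--     return boundary
-- ===== Notes on version B (the rewrite author's own statement) =====
-- stated objective: alternative
-- what changed: Instead of scanning each subset's set bits and probing the family set (A), B precomputes the set of all one-bit supersets of family members (bit indices bounded by the bitwise-OR universe of subsets) and then selects subsets by a single membership test; Pre_ excludes inputs with a negative subset, on which A's lowest-bit loop fails to terminate (Python negative ints have infinitely many set bits) unless an early family hit breaks it, and B's bit_length-bounded enumeration need not match the rare cases where A does return.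
-- outside the precondition, e.g. on positive_boundary((-3,), [-1]): A returns {-1}, B returns set()
import Mathlib
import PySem

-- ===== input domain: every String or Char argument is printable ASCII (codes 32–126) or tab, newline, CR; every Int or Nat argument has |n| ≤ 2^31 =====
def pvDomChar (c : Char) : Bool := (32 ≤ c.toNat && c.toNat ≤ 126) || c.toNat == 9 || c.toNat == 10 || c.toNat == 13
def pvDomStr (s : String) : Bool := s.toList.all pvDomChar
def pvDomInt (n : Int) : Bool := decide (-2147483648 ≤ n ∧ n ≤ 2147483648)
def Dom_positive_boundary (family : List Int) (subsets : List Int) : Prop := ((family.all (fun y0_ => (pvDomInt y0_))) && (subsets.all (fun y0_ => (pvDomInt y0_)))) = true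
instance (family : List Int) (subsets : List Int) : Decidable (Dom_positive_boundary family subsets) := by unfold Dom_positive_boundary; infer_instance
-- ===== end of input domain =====

-- B replaces A's per-subset lowest-bit scan by precomputing the set of all one-bit supersets of
-- family members (bit width bounded by the bitwise-OR of the subsets) and filtering subsets by a
-- single membership test (objective: alternative decomposition, not claimed faster).

-- ===== PORT A =====
-- A's inner 'while candidates:' loop: it either hits 'boundary.add(subset); break' (true) or ends
-- normally (false).  fuel = candidates.natAbs is enough for every nonnegative start (every start
-- inside Pre_); fuel exhaustion, reachable only where the Python loop diverges (negative
-- candidates), yields false.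
def pbWhile (family_set : PySem.Set Int) (subset : Int) : Nat → Int → Bool
  | 0, _ => false
  | fuel+1, candidates =>
    if candidates = 0 then false
    else
      let bit := Int.land candidates (-candidates)
      if family_set.contains (Int.xor subset bit) then true
      else pbWhile family_set subset fuel (Int.xor candidates bit)

def positive_boundary (family : List Int) (subsets : List Int) : List Int :=
  let family_set : PySem.Set Int := PySem.Set.ofList family
  subsets.foldl
    (fun boundary subset =>
      if family_set.contains subset then boundary
      else if pbWhile family_set subset subset.natAbs subset then PySem.Set.add boundary subset
      else boundary)
    PySem.Set.empty

-- ===== PORT B =====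
def positive_boundary_alt (family : List Int) (subsets : List Int) : List Int :=
  let family_set : PySem.Set Int := PySem.Set.ofList family
  let univ : Int := subsets.foldl (fun u s => Int.lor u s) 0
  -- univ.bit_length(): exact, Python's int.bit_length is the bit size of |n| (Nat.size)
  let width : Nat := Nat.size univ.natAbs
  let successors : PySem.Set Int :=
    family.foldl
      (fun succ f =>
        (List.range width).foldl (fun succ (k : Nat) => PySem.Set.add succ (Int.lor f ((1:Int) <<< k))) succ)
      PySem.Set.empty
  subsets.foldl
    (fun boundary s =>
      if !(family_set.contains s) && successors.contains s then PySem.Set.add boundary s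
      else boundary)
    PySem.Set.empty

-- ===== PRECONDITION & SPEC =====
-- Pre_ excludes inputs whose subsets contain a negative number: there A's lowest-bit loop fails to
-- terminate (Python negative ints have infinitely many set bits) unless an early family hit breaks
-- it, and in those rare returning cases B's bit_length-bounded enumeration legitimately differs.
def Pre_positive_boundary (family : List Int) (subsets : List Int) : Prop :=
  ∀ s ∈ subsets, 0 ≤ s
instance (family : List Int) (subsets : List Int) : Decidable (Pre_positive_boundary family subsets) := by unfold Pre_positive_boundary; infer_instance

def pvWitness_positive_boundary : List Int × List Int := ([3, -9], [1, 2, 7, 2])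

def Spec_positive_boundary (family : List Int) (subsets : List Int) (out : List Int) : Prop := out = positive_boundary_alt family subsets
instance (family : List Int) (subsets : List Int) (out : List Int) : Decidable (Spec_positive_boundary family subsets out) := by unfold Spec_positive_boundary; infer_instance

-- ===== CLAIM (what is proved, stated in full; the proofs are below) =====
def Claim_equal_positive_boundary : Prop := ∀ (family : List Int) (subsets : List Int), Dom_positive_boundary family subsets → Pre_positive_boundary family subsets → Spec_positive_boundary family subsets (positive_boundary family subsets)

-- ===== LEMMAS AND PROOFS =====

-- Definitional reductions of Lean core's Int bit operations to Nat
theorem intXor_ofNat (a b : Nat) : Int.xor (a : Int) (b : Int) = ((a ^^^ b : Nat) : Int) := rfl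
theorem intLor_ofNat (a b : Nat) : Int.lor (a : Int) (b : Int) = ((a ||| b : Nat) : Int) := rfl
theorem intLor_negSucc (a b : Nat) : Int.lor (Int.negSucc a) (b : Int) = Int.negSucc (Nat.ldiff a b) := rfl
theorem intLand_lowbit (m : Nat) :
    Int.land ((m+1 : Nat) : Int) (-((m+1 : Nat) : Int)) = ((Nat.ldiff (m+1) m : Nat) : Int) := rfl
theorem intTestBit_ofNat (a : Nat) (k : Nat) : ((a : Nat) : Int).testBit k = a.testBit k := rfl
theorem intShift_one (k : Nat) : ((1:Int) <<< k) = ((2 ^ k : Nat) : Int) := by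
  show ((1 <<< k : Nat) : Int) = ((2 ^ k : Nat) : Int)
  rw [Nat.shiftLeft_eq, Nat.one_mul]

-- n & -n isolates the lowest set bit (stated on Nat via ldiff, n = m+1 > 0)
theorem nat_lowbit (m : Nat) : ∃ j, (m+1).testBit j = true ∧ Nat.ldiff (m+1) m = 2 ^ j := by
  induction m using Nat.strong_induction_on with
  | _ m ih =>
    rcases Nat.even_or_odd m with ⟨t, ht⟩ | ⟨t, ht⟩
    · refine ⟨0, ?_, ?_⟩
      · simp [Nat.testBit_zero]; omega
      · apply Nat.eq_of_testBit_eq; intro k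
        rw [Nat.testBit_ldiff, pow_zero]
        cases k with
        | zero => simp [Nat.testBit_zero]; omega
        | succ k =>
          rw [Nat.testBit_succ, Nat.testBit_succ, Nat.testBit_succ,
            (by omega : (m+1)/2 = t), (by omega : m/2 = t), (by omega : (1:Nat)/2 = 0)]
          simp
    · obtain ⟨j, hj, hld⟩ := ih t (by omega)
      refine ⟨j+1, ?_, ?_⟩
      · rw [Nat.testBit_succ, (by omega : (m+1)/2 = t+1)]; exact hj
      · apply Nat.eq_of_testBit_eq; intro k
        rw [Nat.testBit_ldiff]
        cases k with
        | zero =>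
          rw [Nat.testBit_zero, Nat.testBit_zero, Nat.testBit_zero,
            (by omega : (m+1) % 2 = 0)]
          simp [Nat.pow_succ]
        | succ k =>
          rw [Nat.testBit_succ, Nat.testBit_succ, Nat.testBit_succ,
            (by omega : (m+1)/2 = t+1), (by omega : m/2 = t),
            (by omega : 2^(j+1)/2 = 2^j), ← Nat.testBit_ldiff, hld]

-- clearing a set bit strictly decreases
theorem nat_xor_pow_lt (n j : Nat) (h : n.testBit j = true) : n ^^^ 2 ^ j < n := by
  apply Nat.lt_of_testBit j
  · simp [Nat.testBit_xor, h, Nat.testBit_two_pow]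
  · exact h
  · intro i hi
    rw [Nat.testBit_xor, Nat.testBit_two_pow, decide_eq_false (by omega : ¬ j = i)]
    simp

-- A's inner loop on a nonnegative start with enough fuel finds some set bit whose removal lands in the family set
theorem pbWhile_iff (fs : PySem.Set Int) (s : Int) :
    ∀ (fuel : Nat) (n : Nat), n ≤ fuel →
      (pbWhile fs s fuel ((n : Nat) : Int) = true ↔
        ∃ k, n.testBit k = true ∧ fs.contains (Int.xor s ((2 ^ k : Nat) : Int)) = true) := by
  intro fuel
  induction fuel with
  | zero =>
    intro n hn
    have hn0 : n = 0 := by omega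
    subst hn0
    simp [pbWhile]
  | succ fuel ih =>
    intro n hn
    cases n with
    | zero => simp [pbWhile]
    | succ m =>
      obtain ⟨j, hj, hld⟩ := nat_lowbit m
      have hbit : Int.land ((m+1 : Nat) : Int) (-((m+1 : Nat) : Int)) = ((2 ^ j : Nat) : Int) := by
        rw [intLand_lowbit, hld]
      have hne : ¬ (((m+1 : Nat) : Int) = 0) := by
        intro h
        have := congrArg Int.toNat h
        simp at this
      rw [pbWhile]
      simp only [hbit]
      rw [if_neg hne]
      by_cases hc : fs.contains (Int.xor s ((2 ^ j : Nat) : Int)) = true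
      · rw [if_pos hc]
        simp only [true_iff]
        exact ⟨j, hj, hc⟩
      · rw [if_neg hc]
        have hlt : (m+1) ^^^ 2 ^ j < m + 1 := nat_xor_pow_lt (m+1) j hj
        rw [intXor_ofNat, ih ((m+1) ^^^ 2 ^ j) (by omega)]
        constructor
        · rintro ⟨k, hk, hck⟩
          refine ⟨k, ?_, hck⟩
          by_cases hkj : j = k
          · subst hkj
            rw [Nat.testBit_xor, hj, Nat.testBit_two_pow] at hk
            simp at hk
          · rw [Nat.testBit_xor, Nat.testBit_two_pow] at hk
            simpa [hkj] using hk
        · rintro ⟨k, hk, hck⟩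
          have hkj : ¬ j = k := by
            intro h; subst h; exact hc hck
          refine ⟨k, ?_, hck⟩
          rw [Nat.testBit_xor, Nat.testBit_two_pow, hk]
          simp [hkj]

-- membership in a fold of Set.add
theorem mem_foldl_add {β : Type} (g : β → Int) (l : List β) (x : Int) :
    ∀ acc : PySem.Set Int,
      (x ∈ l.foldl (fun a k => PySem.Set.add a (g k)) acc ↔ x ∈ acc ∨ ∃ k ∈ l, x = g k) := by
  induction l with
  | nil => simp
  | cons b l ih =>
    intro acc
    simp only [List.foldl, ih, PySem.Set.mem_add, List.mem_cons]
    constructor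
    · rintro (⟨h | h⟩ | ⟨k, hk, hx⟩)
      · exact Or.inl h
      · exact Or.inr ⟨b, Or.inl rfl, h⟩
      · exact Or.inr ⟨k, Or.inr hk, hx⟩
    · rintro (h | ⟨k, (rfl | hk), hx⟩)
      · exact Or.inl (Or.inl h)
      · exact Or.inl (Or.inr hx)
      · exact Or.inr ⟨k, hk, hx⟩

-- membership in B's 'successors' set
theorem mem_successors (family : List Int) (w : Nat) (x : Int) :
    ∀ acc : PySem.Set Int,
      (x ∈ family.foldl
          (fun succ f =>
            (List.range w).foldl (fun succ (k : Nat) => PySem.Set.add succ (Int.lor f ((1:Int) <<< k))) succ)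
          acc ↔
        x ∈ acc ∨ ∃ f ∈ family, ∃ k < w, x = Int.lor f ((1:Int) <<< k)) := by
  induction family with
  | nil => simp
  | cons f fam ih =>
    intro acc
    simp only [List.foldl, ih, mem_foldl_add, List.mem_range, List.mem_cons]
    constructor
    · rintro (⟨h | ⟨k, hk, hx⟩⟩ | ⟨f', hf', hx⟩)
      · exact Or.inl h
      · exact Or.inr ⟨f, Or.inl rfl, k, hk, hx⟩
      · exact Or.inr ⟨f', Or.inr hf', hx⟩
    · rintro (h | ⟨f', (rfl | hf'), hx⟩)
      · exact Or.inl (Or.inl h)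
      · exact Or.inl (Or.inr hx)
      · exact Or.inr ⟨f', hf', hx⟩

-- a fold of lor keeps every bit of its accumulator
theorem testBit_foldl_lor_init (l : List Int) (k : Nat) :
    ∀ init : Int, init.testBit k = true →
      (l.foldl (fun u s => Int.lor u s) init).testBit k = true := by
  induction l with
  | nil => intro init h; exact h
  | cons a l ih =>
    intro init h
    exact ih (Int.lor init a) (by simp [Int.testBit_lor, h])

-- every bit of every element appears in the fold of lor
theorem testBit_foldl_lor (l : List Int) (x : Int) (k : Nat) (h : x.testBit k = true) :
    ∀ init : Int, x ∈ l → (l.foldl (fun u s => Int.lor u s) init).testBit k = true := by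
  induction l with
  | nil => intro init hx; cases hx
  | cons a l ih =>
    intro init hx
    rcases List.mem_cons.mp hx with rfl | hxl
    · exact testBit_foldl_lor_init l k (Int.lor init x) (by simp [Int.testBit_lor, h])
    · exact ih (Int.lor init a) hxl
theorem foldl_lor_nonneg (l : List Int) :
    ∀ init : Int, 0 ≤ init → (∀ x ∈ l, 0 ≤ x) → 0 ≤ l.foldl (fun u s => Int.lor u s) init := by
  induction l with
  | nil => intro init h0 _; exact h0
  | cons a l ih =>
    intro init h0 h
    have ha : 0 ≤ a := h a (List.mem_cons_self ..)
    obtain ⟨ni, rfl⟩ := Int.eq_ofNat_of_zero_le h0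
    obtain ⟨na, rfl⟩ := Int.eq_ofNat_of_zero_le ha
    refine ih (Int.lor (ni : Int) (na : Int)) ?_ (fun x hx => h x (List.mem_cons_of_mem _ hx))
    rw [intLor_ofNat]
    exact Int.ofNat_nonneg _

-- the bridge: a non-family subset has a set bit whose removal is a family member iff it is a
-- one-bit superset (inside the first w bits) of a family member
theorem bridge (family : List Int) (w : Nat) (n : Nat)
    (hw : ∀ k, n.testBit k = true → k < w)
    (hnf : ((n : Nat) : Int) ∉ family) :
    ((∃ k, n.testBit k = true ∧ (Int.xor ((n:Nat) : Int) ((2 ^ k : Nat) : Int)) ∈ family) ↔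
      ∃ f ∈ family, ∃ k < w, ((n : Nat) : Int) = Int.lor f ((1:Int) <<< k)) := by
  constructor
  · rintro ⟨k, hk, hmem⟩
    refine ⟨Int.xor ((n:Nat) : Int) ((2 ^ k : Nat) : Int), hmem, k, hw k hk, ?_⟩
    rw [intShift_one, intXor_ofNat, intLor_ofNat]
    congr 1
    apply Nat.eq_of_testBit_eq; intro i
    rw [Nat.testBit_lor, Nat.testBit_xor, Nat.testBit_two_pow]
    by_cases hik : k = i
    · subst hik
      simp [hk]
    · simp [hik]
  · rintro ⟨f, hf, k, hkw, heq⟩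
    rw [intShift_one] at heq
    cases f with
    | negSucc a =>
      rw [intLor_negSucc] at heq
      cases heq
    | ofNat a =>
      have heq' : ((n : Nat) : Int) = ((a ||| 2 ^ k : Nat) : Int) := heq
      have hna : n = a ||| 2 ^ k := by exact_mod_cast heq'
      have hak : a.testBit k = false := by
        by_contra hbt
        have hbt' : a.testBit k = true := by
          cases h : a.testBit k
          · exact absurd h hbt
          · rfl
        have haa : a ||| 2 ^ k = a := by
          apply Nat.eq_of_testBit_eq; intro i
          rw [Nat.testBit_lor, Nat.testBit_two_pow]
          by_cases hik : k = i
          · subst hik; simp [hbt']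
          · simp [hik]
        rw [haa] at hna
        subst hna
        exact hnf hf
      refine ⟨k, ?_, ?_⟩
      · subst hna; simp [Nat.testBit_lor, Nat.testBit_two_pow]
      · rw [intXor_ofNat]
        have hb : n ^^^ 2 ^ k = a := by
          subst hna
          apply Nat.eq_of_testBit_eq; intro i
          rw [Nat.testBit_xor, Nat.testBit_lor, Nat.testBit_two_pow]
          by_cases hik : k = i
          · subst hik; simp [hak]
          · simp [hik]
        rw [hb]
        exact hf

-- pointwise agreement of the two folds over subsets
theorem boundary_eq_alt (family subsets : List Int) (hpre : Pre_positive_boundary family subsets) :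
    positive_boundary family subsets = positive_boundary_alt family subsets := by
  unfold positive_boundary positive_boundary_alt
  apply PySem.List.foldl_congr_mem
  intro acc s hs
  have hs0 : 0 ≤ s := hpre s hs
  obtain ⟨n, rfl⟩ := Int.eq_ofNat_of_zero_le hs0
  by_cases hfam : (PySem.Set.ofList family).contains ((n : Nat) : Int) = true
  · rw [hfam]
    simp
  · have hfam' : (PySem.Set.ofList family).contains ((n : Nat) : Int) = false :=
      Bool.eq_false_iff.mpr hfam
    have hnf : ((n : Nat) : Int) ∉ family := by
      intro h
      exact hfam ((PySem.Set.contains_iff _ _).mpr ((PySem.Set.mem_ofList _ _).mpr h))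
    have hw : ∀ k, n.testBit k = true →
        k < Nat.size (subsets.foldl (fun u s => Int.lor u s) 0).natAbs := by
      intro k hk
      have hu0 : 0 ≤ subsets.foldl (fun u s => Int.lor u s) 0 :=
        foldl_lor_nonneg subsets 0 (le_refl _) hpre
      obtain ⟨nu, hnu⟩ := Int.eq_ofNat_of_zero_le hu0
      have hbit := testBit_foldl_lor subsets ((n : Nat) : Int) k (by rw [intTestBit_ofNat]; exact hk) 0 hs
      rw [hnu, intTestBit_ofNat] at hbit
      rw [hnu, Int.natAbs_natCast]
      by_contra hlt
      have : nu < 2 ^ k := Nat.size_le.mp (by omega)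
      rw [Nat.testBit_lt_two_pow this] at hbit
      cases hbit
    have hA := pbWhile_iff (PySem.Set.ofList family) ((n : Nat) : Int)
      ((n : Nat) : Int).natAbs n (by rw [Int.natAbs_natCast])
    have hcond :
        pbWhile (PySem.Set.ofList family) ((n : Nat) : Int) ((n : Nat) : Int).natAbs ((n : Nat) : Int) =
        (family.foldl
          (fun succ f =>
            (List.range (Nat.size (subsets.foldl (fun u s => Int.lor u s) 0).natAbs)).foldl
              (fun succ (k : Nat) => PySem.Set.add succ (Int.lor f ((1:Int) <<< k))) succ)
          PySem.Set.empty).contains ((n : Nat) : Int) := by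
      rw [Bool.eq_iff_iff, hA, PySem.Set.contains_iff,
        mem_successors family _ _ PySem.Set.empty]
      have hb := bridge family (Nat.size (subsets.foldl (fun u s => Int.lor u s) 0).natAbs) n hw hnf
      constructor
      · rintro ⟨k, hk, hc⟩
        have hm : (Int.xor ((n : Nat) : Int) ((2 ^ k : Nat) : Int)) ∈ family :=
          (PySem.Set.mem_ofList _ _).mp ((PySem.Set.contains_iff _ _).mp hc)
        exact Or.inr (hb.mp ⟨k, hk, hm⟩)
      · rintro (h | h)
        · cases h
        · obtain ⟨k, hk, hm⟩ := hb.mpr h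
          exact ⟨k, hk, (PySem.Set.contains_iff _ _).mpr ((PySem.Set.mem_ofList _ _).mpr hm)⟩
    rw [hfam', hcond]
    simp

-- ===== VERDICT (by name: the statement is the Claim_ definition above) =====
theorem positive_boundary_spec : Claim_equal_positive_boundary := by
  intro family subsets _hdom hpre
  unfold Spec_positive_boundary
  exact boundary_eq_alt family subsets hpre
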